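-- pv_equiv track=rewrite | github.com/Archie-MarqX/Data-Science | src/Skyfield.py | get_Moon_Phases_
-- ===== SOURCE A (Python) =====
-- def get_Moon_Phases_(moon_Degree):
--     moon_Phases = []
--
--     for element in moon_Degree:
--         if element < 90:
--             moon_Phases.append("Lua Nova")
--         if element >= 90 and element < 180:
--             moon_Phases.append("Lua Crescente")
--         if element >= 180 and element < 270:
--             moon_Phases.append("Lua Cheia")
--         if element >= 270 and element < 360:
--             moon_Phases.append("Lua Minguante")
--         if element >= 360:
--             moon_Phases.append("Lua Nova")
--
--     return moon_Phases
-- ===== SOURCE B (Python) =====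
-- def get_Moon_Phases_(moon_Degree):
--     # Table lookup: index = number of thresholds <= element; one expression per element.
--     thresholds = (90, 180, 270, 360)
--     names = ("Lua Nova", "Lua Crescente", "Lua Cheia", "Lua Minguante", "Lua Nova")
--     return [names[sum(t <= element for t in thresholds)] for element in moon_Degree]
-- ===== Notes on version B (the rewrite author's own statement) =====
-- stated objective: simpler
-- what changed: Replaces the five-branch if-chain with a threshold table: the phase index is the count of thresholds <= element, looked up in a names tuple via a single comprehension.
import Mathlib
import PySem

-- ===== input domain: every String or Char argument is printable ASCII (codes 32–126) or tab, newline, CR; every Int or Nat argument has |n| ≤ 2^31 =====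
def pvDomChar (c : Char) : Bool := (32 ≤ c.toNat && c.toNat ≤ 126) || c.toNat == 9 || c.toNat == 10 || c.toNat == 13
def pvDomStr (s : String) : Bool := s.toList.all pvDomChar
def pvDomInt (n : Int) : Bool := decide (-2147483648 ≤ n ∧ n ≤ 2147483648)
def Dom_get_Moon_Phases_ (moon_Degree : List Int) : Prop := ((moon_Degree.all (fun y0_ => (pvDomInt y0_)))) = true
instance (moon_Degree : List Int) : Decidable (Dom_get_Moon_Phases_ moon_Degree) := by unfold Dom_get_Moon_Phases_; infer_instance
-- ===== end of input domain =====

-- B replaces A's per-element if-chain by a threshold-table lookup (index = count of thresholds ≤ element); same O(n) cost, simpler.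


-- ===== PORT A =====
-- loop body: five sequential if-appends, in A's order
def pvStepA (acc : List String) (element : Int) : List String :=
  let acc := if element < 90 then acc ++ ["Lua Nova"] else acc
  let acc := if 90 ≤ element ∧ element < 180 then acc ++ ["Lua Crescente"] else acc
  let acc := if 180 ≤ element ∧ element < 270 then acc ++ ["Lua Cheia"] else acc
  let acc := if 270 ≤ element ∧ element < 360 then acc ++ ["Lua Minguante"] else acc
  if 360 ≤ element then acc ++ ["Lua Nova"] else acc

def get_Moon_Phases_ (moon_Degree : List Int) : List String :=
  moon_Degree.foldl pvStepA []

-- ===== PORT B =====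
-- names[sum(t <= element for t in thresholds)] for each element
def get_Moon_Phases__alt (moon_Degree : List Int) : List String :=
  moon_Degree.map (fun element =>
    PySem.List.pyGetD ["Lua Nova", "Lua Crescente", "Lua Cheia", "Lua Minguante", "Lua Nova"]
      ((([90, 180, 270, 360] : List Int).map (fun t => if t ≤ element then (1 : Int) else 0)).sum) "")

-- ===== PRECONDITION & SPEC =====
def Spec_get_Moon_Phases_ (moon_Degree : List Int) (out : List String) : Prop := out = get_Moon_Phases__alt moon_Degree
instance (moon_Degree : List Int) (out : List String) : Decidable (Spec_get_Moon_Phases_ moon_Degree out) := by unfold Spec_get_Moon_Phases_; infer_instance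

-- ===== CLAIM (what is proved, stated in full; the proofs are below) =====
def Claim_equal_get_Moon_Phases_ : Prop := ∀ (moon_Degree : List Int), Dom_get_Moon_Phases_ moon_Degree → Spec_get_Moon_Phases_ moon_Degree (get_Moon_Phases_ moon_Degree)

-- ===== LEMMAS AND PROOFS =====
-- B's per-element function
def pvPhaseB (element : Int) : String :=
  PySem.List.pyGetD ["Lua Nova", "Lua Crescente", "Lua Cheia", "Lua Minguante", "Lua Nova"]
    ((([90, 180, 270, 360] : List Int).map (fun t => if t ≤ element then (1 : Int) else 0)).sum) ""

theorem pvStepA_eq (acc : List String) (e : Int) : pvStepA acc e = acc ++ [pvPhaseB e] := by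
  by_cases h1 : e < 90 <;> by_cases h2 : e < 180 <;> by_cases h3 : e < 270 <;> by_cases h4 : e < 360 <;>
    [skip; omega; omega; omega; omega; omega; omega; omega; skip; omega; omega; omega; skip; omega; skip; skip] <;>
    simp [pvStepA, pvPhaseB, h1, h2, h3, h4,
      show ((90:Int) ≤ e) = (¬ e < 90) by simp,
      show ((180:Int) ≤ e) = (¬ e < 180) by simp,
      show ((270:Int) ≤ e) = (¬ e < 270) by simp,
      show ((360:Int) ≤ e) = (¬ e < 360) by simp,
      PySem.List.pyGetD, PySem.List.pyGet?, PySem.List.pyIdx?]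

theorem foldl_stepA (l : List Int) (acc : List String) :
    l.foldl pvStepA acc = acc ++ l.map pvPhaseB := by
  induction l generalizing acc with
  | nil => simp
  | cons x xs ih => simp [List.foldl, pvStepA_eq, ih]

-- ===== VERDICT (by name: the statement is the Claim_ definition above) =====
theorem get_Moon_Phases__spec : Claim_equal_get_Moon_Phases_ := by
  intro l _
  show get_Moon_Phases_ l = get_Moon_Phases__alt l
  simp [get_Moon_Phases_, get_Moon_Phases__alt, foldl_stepA, pvPhaseB]
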